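-- pv_equiv track=rewrite | github.com/akeavenyhelioscta/helioscta-pjm-da | backend/src/views/forecast_results.py | _compress_hours
-- ===== SOURCE A (Python) =====
-- def _compress_hours(hours: list[int]) -> str:
--     """Compress a list of hours into range notation.
--
--     Example: [8, 9, 10, 14, 22, 23] → "HE8-10, HE14, HE22-23"
--     """
--     if not hours:
--         return ""
--     sorted_hours = sorted(hours)
--     ranges: list[str] = []
--     start = prev = sorted_hours[0]
--     for h in sorted_hours[1:]:
--         if h == prev + 1:
--             prev = h
--         else:
--             ranges.append(f"HE{start}" if start == prev else f"HE{start}-{prev}")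
--             start = prev = h
--     ranges.append(f"HE{start}" if start == prev else f"HE{start}-{prev}")
--     return ", ".join(ranges)
-- ===== SOURCE B (Python) =====
-- def _compress_hours(hours: list[int]) -> str:
--     """Compress a list of hours into range notation.
--
--     Two staged passes with no scan state: first compute the run-boundary
--     indices of the sorted list (an index i is a boundary iff it is an end of
--     the list or the adjacency s[i] == s[i-1] + 1 fails), then format each
--     consecutive boundary pair as one segment.  The empty list yields a single
--     boundary [0], hence no pairs and ''.
--     """
--     s = sorted(hours)
--     n = len(s)
--     cuts = [i for i in range(n + 1) if i == 0 or i == n or s[i] != s[i - 1] + 1]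
--     return ", ".join(
--         f"HE{s[a]}" if a == b - 1 else f"HE{s[a]}-{s[b - 1]}"
--         for a, b in zip(cuts, cuts[1:])
--     )
-- ===== Notes on version B (the rewrite author's own statement) =====
-- stated objective: alternative
-- what changed: B does two staged stateless passes: a comprehension collects the run-boundary indices of the sorted list via a per-index adjacency predicate, then each consecutive boundary pair is formatted as one segment; A instead runs a single stateful scan with start/prev accumulators and in-loop string emission plus a trailing append.
import Mathlib
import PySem

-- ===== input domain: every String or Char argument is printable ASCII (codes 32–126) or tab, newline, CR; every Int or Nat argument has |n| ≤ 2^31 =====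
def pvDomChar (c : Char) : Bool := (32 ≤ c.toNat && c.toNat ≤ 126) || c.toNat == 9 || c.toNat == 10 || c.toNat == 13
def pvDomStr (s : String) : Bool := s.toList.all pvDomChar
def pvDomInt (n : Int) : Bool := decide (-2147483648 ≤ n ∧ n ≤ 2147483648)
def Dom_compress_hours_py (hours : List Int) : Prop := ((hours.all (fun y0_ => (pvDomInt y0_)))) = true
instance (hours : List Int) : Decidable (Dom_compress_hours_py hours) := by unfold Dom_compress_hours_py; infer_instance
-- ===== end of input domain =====

-- B replaces A's stateful start/prev scan with two staged stateless passes: a per-index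
-- adjacency predicate collects the run-boundary indices of the sorted list, then each
-- consecutive boundary pair is formatted as one segment — alternative decomposition, same cost.

-- ===== PORT A =====
-- loop body of A: state is (ranges, start, prev)
def pvAStep (st : List String × Int × Int) (h : Int) : List String × Int × Int :=
  if h = st.2.2 + 1 then (st.1, st.2.1, h)
  else (st.1 ++ [if st.2.1 = st.2.2 then "HE" ++ PySem.Int.toStr st.2.1
                 else "HE" ++ PySem.Int.toStr st.2.1 ++ "-" ++ PySem.Int.toStr st.2.2], h, h)

def compress_hours_py (hours : List Int) : String :=
  if hours = [] then ""
  else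
    match PySem.List.sorted hours (fun x => x) false with
    | [] => ""  -- unreachable: hours ≠ []
    | s0 :: rest =>
      let st := rest.foldl pvAStep ([], s0, s0)
      PySem.Str.join ", "
        (st.1 ++ [if st.2.1 = st.2.2 then "HE" ++ PySem.Int.toStr st.2.1
                  else "HE" ++ PySem.Int.toStr st.2.1 ++ "-" ++ PySem.Int.toStr st.2.2])

-- ===== PORT B =====
-- Source B's boundary-index comprehension.  s[i]/s[i-1] are rendered with getD: the
-- Python adjacency clause is only reached (short-circuit `or`) when 0 < i < n, where
-- getD is exactly Python's s[i]; at i = 0 and i = n both sides short-circuit to True.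
-- Every produced pair (a, b) has 1 ≤ b, where Nat b-1 equals Python's b-1.
def compress_hours_py_alt (hours : List Int) : String :=
  let s := PySem.List.sorted hours (fun x => x) false
  let n := s.length
  let cuts := (List.range (n + 1)).filter
    (fun i => i == 0 || i == n || !(s.getD i 0 == s.getD (i - 1) 0 + 1))
  PySem.Str.join ", " ((cuts.zip cuts.tail).map (fun ab =>
    if (ab.1 : Int) = (ab.2 : Int) - 1 then "HE" ++ PySem.Int.toStr (s.getD ab.1 0)
    else "HE" ++ PySem.Int.toStr (s.getD ab.1 0) ++ "-" ++ PySem.Int.toStr (s.getD (ab.2 - 1) 0)))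

-- ===== PRECONDITION & SPEC =====
def Spec_compress_hours_py (hours : List Int) (out : String) : Prop := out = compress_hours_py_alt hours
instance (hours : List Int) (out : String) : Decidable (Spec_compress_hours_py hours out) := by unfold Spec_compress_hours_py; infer_instance

-- ===== CLAIM (what is proved, stated in full; the proofs are below) =====
def Claim_equal_compress_hours_py : Prop := ∀ (hours : List Int), Dom_compress_hours_py hours → Spec_compress_hours_py hours (compress_hours_py hours)

-- ===== LEMMAS AND PROOFS =====

-- proof-side canonical form: the list of (start, end) runs, built by appending
def pvBStep (runs : List (Int × Int)) (h : Int) : List (Int × Int) :=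
  match runs.getLast? with
  | some r => if h = r.2 + 1 then runs.dropLast ++ [(r.1, h)] else runs ++ [(h, h)]
  | none => [(h, h)]

def pvFmt (r : Int × Int) : String :=
  if r.1 = r.2 then "HE" ++ PySem.Int.toStr r.1
  else "HE" ++ PySem.Int.toStr r.1 ++ "-" ++ PySem.Int.toStr r.2

-- B-side machinery: boundary pairs and the boundary indices strictly below n
def pvPairs (l : List Nat) : List (Nat × Nat) := l.zip l.tail

def pvG (s : List Int) (ab : Nat × Nat) : Int × Int := (s.getD ab.1 0, s.getD (ab.2 - 1) 0)

def pvCutsInit (s : List Int) : List Nat :=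
  (List.range s.length).filter (fun i => i == 0 || !(s.getD i 0 == s.getD (i - 1) 0 + 1))

-- A-side invariant: the runs built by pvBStep are A's already-emitted ranges plus the open run (start, prev).
lemma pv_inv (l : List Int) (R : List (Int × Int)) (s p : Int) :
    (l.foldl pvBStep (R ++ [(s, p)])).map pvFmt
      = (l.foldl pvAStep (R.map pvFmt, s, p)).1
        ++ [pvFmt ((l.foldl pvAStep (R.map pvFmt, s, p)).2.1,
                   (l.foldl pvAStep (R.map pvFmt, s, p)).2.2)] := by
  induction l generalizing R s p with
  | nil => simp
  | cons h t ih =>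
    simp only [List.foldl_cons]
    have hb : pvBStep (R ++ [(s, p)]) h
        = if h = p + 1 then R ++ [(s, h)] else (R ++ [(s, p)]) ++ [(h, h)] := by
      simp [pvBStep]
    by_cases hc : h = p + 1
    · rw [hb, if_pos hc, show pvAStep (R.map pvFmt, s, p) h = (R.map pvFmt, s, h) by
        simp [pvAStep, hc]]
      exact ih R s h
    · rw [hb, if_neg hc, show pvAStep (R.map pvFmt, s, p) h
          = (R.map pvFmt ++ [pvFmt (s, p)], h, h) by simp [pvAStep, hc, pvFmt]]
      have := ih (R ++ [(s, p)]) h h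
      simpa using this

lemma pv_cuts_decomp (s : List Int) :
    (List.range (s.length + 1)).filter
      (fun i => i == 0 || i == s.length || !(s.getD i 0 == s.getD (i - 1) 0 + 1))
      = pvCutsInit s ++ [s.length] := by
  rw [List.range_succ, List.filter_append]
  congr 1
  · apply List.filter_congr
    intro i hi
    have : i < s.length := List.mem_range.mp hi
    have h2 : (i == s.length) = false := by simp; omega
    simp [h2]
  · simp

lemma pv_pairs_snoc (l : List Nat) (b : Nat) :
    pvPairs (l ++ [b]) = pvPairs l ++ (match l.getLast? with
      | some a => [(a, b)] | none => []) := by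
  induction l with
  | nil => simp [pvPairs]
  | cons c l' ih =>
    cases l' with
    | nil => simp [pvPairs]
    | cons d l'' =>
      have h1 : pvPairs (c :: d :: l'') = (c, d) :: pvPairs (d :: l'') := by simp [pvPairs]
      have h2 : pvPairs ((c :: d :: l'') ++ [b]) = (c, d) :: pvPairs ((d :: l'') ++ [b]) := by
        simp [pvPairs]
      rw [h2, ih, h1, List.getLast?_cons_cons]
      simp
lemma pv_cutsInit_snoc (s : List Int) (x : Int) :
    pvCutsInit (s ++ [x]) = pvCutsInit s ++
      (if s.length ≠ 0 ∧ x = s.getD (s.length - 1) 0 + 1 then [] else [s.length]) := by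
  unfold pvCutsInit
  rw [List.length_append, List.length_singleton, List.range_succ, List.filter_append]
  congr 1
  · apply List.filter_congr
    intro i hi
    have hlt : i < s.length := List.mem_range.mp hi
    have e1 : (s ++ [x]).getD i 0 = s.getD i 0 := List.getD_append _ _ _ _ hlt
    have e2 : (s ++ [x]).getD (i - 1) 0 = s.getD (i - 1) 0 :=
      List.getD_append _ _ _ _ (by omega)
    rw [e1, e2]
  · have ex : (s ++ [x]).getD s.length 0 = x := by simp [List.getD]
    by_cases hn : s.length = 0
    · rcases List.length_eq_zero_iff.mp hn with rfl
      simp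
    · have e2 : (s ++ [x]).getD (s.length - 1) 0 = s.getD (s.length - 1) 0 :=
        List.getD_append _ _ _ _ (by omega)
      simp only [List.filter_cons, List.filter_nil]
      rw [ex, e2]
      by_cases hx : x = s.getD (s.length - 1) 0 + 1
      · simp [hn, hx]
      · simp [hn]

lemma pv_cutsInit_mem_lt (s : List Int) : ∀ i ∈ pvCutsInit s, i < s.length := by
  intro i hi
  exact List.mem_range.mp (List.mem_of_mem_filter hi)

lemma pv_pairs_mem {l : List Nat} {ab : Nat × Nat} (h : ab ∈ pvPairs l) :
    ab.1 ∈ l ∧ ab.2 ∈ l := by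
  obtain ⟨h1, h2⟩ := List.of_mem_zip (by exact h)
  exact ⟨h1, List.mem_of_mem_tail h2⟩

lemma pvBStep_concat (m : List (Int × Int)) (r : Int × Int) (x : Int) :
    pvBStep (m ++ [r]) x = if x = r.2 + 1 then m ++ [(r.1, x)] else (m ++ [r]) ++ [(x, x)] := by
  simp [pvBStep]

lemma pv_main (s : List Int) :
    (pvPairs (pvCutsInit s ++ [s.length])).map (pvG s) = s.foldl pvBStep []
    ∧ ∀ ab ∈ pvPairs (pvCutsInit s ++ [s.length]),
        ab.1 < ab.2 ∧ ab.2 ≤ s.length ∧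
        s.getD (ab.2 - 1) 0 = s.getD ab.1 0 + ((ab.2 : Int) - 1 - (ab.1 : Int)) := by
  induction s using List.reverseRecOn with
  | nil => constructor <;> simp [pvCutsInit, pvPairs]
  | append_singleton s x ih =>
    obtain ⟨ih1, ih2⟩ := ih
    have hlen : (s ++ [x]).length = s.length + 1 := by simp
    have hgetx : (s ++ [x]).getD s.length 0 = x := by simp [List.getD]
    have hstable : ∀ i, i < s.length → (s ++ [x]).getD i 0 = s.getD i 0 := by
      intro i hi; exact List.getD_append _ _ _ _ hi
    rw [pv_cutsInit_snoc, hlen, List.foldl_append, List.foldl_cons, List.foldl_nil]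
    by_cases hc : s.length ≠ 0 ∧ x = s.getD (s.length - 1) 0 + 1
    · -- continuation: last run extends
      obtain ⟨hn, hx⟩ := hc
      rw [if_pos ⟨hn, hx⟩, List.append_nil]
      have hsne : s ≠ [] := by intro h; subst h; simp at hn
      -- cutsInit s is nonempty (contains 0)
      have h0mem : (0 : Nat) ∈ pvCutsInit s := by
        unfold pvCutsInit
        refine List.mem_filter.mpr ⟨List.mem_range.mpr (by omega), by simp⟩
      have hLne : pvCutsInit s ≠ [] := by intro h; rw [h] at h0mem; simp at h0mem
      obtain ⟨L, hL⟩ : ∃ L, (pvCutsInit s).getLast? = some L :=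
        ⟨_, List.getLast?_eq_some_getLast hLne⟩
      have hLlt : L < s.length :=
        pv_cutsInit_mem_lt s L (List.mem_of_getLast? hL)
      have hp1 : pvPairs (pvCutsInit s ++ [s.length]) = pvPairs (pvCutsInit s) ++ [(L, s.length)] := by
        rw [pv_pairs_snoc, hL]
      have hp2 : pvPairs (pvCutsInit s ++ [s.length + 1]) = pvPairs (pvCutsInit s) ++ [(L, s.length + 1)] := by
        rw [pv_pairs_snoc, hL]
      have hmemb : ∀ ab ∈ pvPairs (pvCutsInit s), ab.1 < s.length ∧ ab.2 < s.length := by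
        intro ab hab
        obtain ⟨m1, m2⟩ := pv_pairs_mem hab
        exact ⟨pv_cutsInit_mem_lt s _ m1, pv_cutsInit_mem_lt s _ m2⟩
      have hmapold : (pvPairs (pvCutsInit s)).map (pvG (s ++ [x])) = (pvPairs (pvCutsInit s)).map (pvG s) := by
        apply List.map_congr_left
        intro ab hab
        obtain ⟨l1, l2⟩ := hmemb ab hab
        unfold pvG
        rw [hstable _ l1, hstable _ (by omega)]
      -- IH fact about the last pair (L, s.length)
      have hlastpair : (L, s.length) ∈ pvPairs (pvCutsInit s ++ [s.length]) := by
        rw [hp1]; exact List.mem_append_right _ (by simp)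
      obtain ⟨hLlt2, _, hspan⟩ := ih2 _ hlastpair
      -- runs from IH
      have hruns : s.foldl pvBStep [] = (pvPairs (pvCutsInit s)).map (pvG s) ++ [pvG s (L, s.length)] := by
        rw [← ih1, hp1, List.map_append]; simp
      have hstep : pvBStep (s.foldl pvBStep []) x
          = (pvPairs (pvCutsInit s)).map (pvG s) ++ [((pvG s (L, s.length)).1, x)] := by
        rw [hruns, pvBStep_concat]
        have hxx : x = (pvG s (L, s.length)).2 + 1 := by
          unfold pvG; simpa using hx
        rw [if_pos hxx]
      constructor
      · rw [hp2, List.map_append, hmapold, hstep]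
        simp only [List.map_cons, List.map_nil, pvG, Nat.add_sub_cancel]
        rw [hstable _ hLlt, hgetx]
      · intro ab hab
        rw [hp2] at hab
        rcases List.mem_append.mp hab with h | h
        · have hin : ab ∈ pvPairs (pvCutsInit s ++ [s.length]) := by
            rw [hp1]; exact List.mem_append_left _ h
          obtain ⟨a1, a2, a3⟩ := ih2 _ hin
          obtain ⟨l1, l2⟩ := hmemb ab h
          refine ⟨a1, by omega, ?_⟩
          rw [hstable _ (by omega), hstable _ l1]
          exact a3
        · simp at h
          subst h
          refine ⟨by omega, by omega, ?_⟩
          simp only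
          rw [show s.length + 1 - 1 = s.length from rfl, hgetx, hstable _ hLlt]
          have h2 : s.getD (s.length - 1) 0 = s.getD L 0 + ((s.length : Int) - 1 - (L : Int)) := by
            simpa using hspan
          rw [hx, h2]
          push_cast
          ring
    · -- break: a new singleton run is appended
      rw [if_neg hc]
      have hp2 : pvPairs ((pvCutsInit s ++ [s.length]) ++ [s.length + 1])
          = pvPairs (pvCutsInit s ++ [s.length]) ++ [(s.length, s.length + 1)] := by
        rw [pv_pairs_snoc, List.getLast?_concat]
      have hmemold : ∀ ab ∈ pvPairs (pvCutsInit s ++ [s.length]), ab.1 < s.length ∧ ab.2 ≤ s.length := by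
        intro ab hab
        obtain ⟨a1, a2, _⟩ := ih2 _ hab
        exact ⟨by omega, a2⟩
      have hmapold : (pvPairs (pvCutsInit s ++ [s.length])).map (pvG (s ++ [x]))
          = (pvPairs (pvCutsInit s ++ [s.length])).map (pvG s) := by
        apply List.map_congr_left
        intro ab hab
        obtain ⟨l1, l2⟩ := hmemold ab hab
        unfold pvG
        rw [hstable _ l1, hstable _ (by omega)]
      have hstep : pvBStep (s.foldl pvBStep []) x = s.foldl pvBStep [] ++ [(x, x)] := by
        by_cases hn : s.length = 0
        · rcases List.length_eq_zero_iff.mp hn with rfl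
          simp [pvBStep]
        · have h0mem : (0 : Nat) ∈ pvCutsInit s := by
            unfold pvCutsInit
            refine List.mem_filter.mpr ⟨List.mem_range.mpr (by omega), by simp⟩
          have hLne : pvCutsInit s ≠ [] := by intro h; rw [h] at h0mem; simp at h0mem
          obtain ⟨L, hL⟩ : ∃ L, (pvCutsInit s).getLast? = some L :=
            ⟨_, List.getLast?_eq_some_getLast hLne⟩
          have hp1 : pvPairs (pvCutsInit s ++ [s.length]) = pvPairs (pvCutsInit s) ++ [(L, s.length)] := by
            rw [pv_pairs_snoc, hL]
          have hruns : s.foldl pvBStep [] = (pvPairs (pvCutsInit s)).map (pvG s) ++ [pvG s (L, s.length)] := by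
            rw [← ih1, hp1, List.map_append]; simp
          rw [hruns, pvBStep_concat]
          have hne2 : ¬ (x = (pvG s (L, s.length)).2 + 1) := by
            unfold pvG
            simp only
            intro hcon
            exact hc ⟨hn, by simpa using hcon⟩
          rw [if_neg hne2]
      constructor
      · rw [hp2, List.map_append, hmapold, ih1, hstep]
        simp only [List.map_cons, List.map_nil, pvG, Nat.add_sub_cancel]
        rw [hgetx]
      · intro ab hab
        rw [hp2] at hab
        rcases List.mem_append.mp hab with h | h
        · obtain ⟨a1, a2, a3⟩ := ih2 _ h
          obtain ⟨l1, l2⟩ := hmemold ab h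
          refine ⟨a1, by omega, ?_⟩
          rw [hstable _ (by omega), hstable _ l1]
          exact a3
        · simp at h
          subst h
          refine ⟨by omega, by omega, ?_⟩
          simp only
          rw [show s.length + 1 - 1 = s.length from rfl, hgetx]
          push_cast
          ring

-- B's output characterized through the run list
lemma pv_B_char (hours : List Int) :
    compress_hours_py_alt hours
      = PySem.Str.join ", "
          (((PySem.List.sorted hours (fun x => x) false).foldl pvBStep []).map pvFmt) := by
  unfold compress_hours_py_alt
  set s := PySem.List.sorted hours (fun x => x) false with hsdef
  simp only [pv_cuts_decomp s]
  obtain ⟨h1, h2⟩ := pv_main s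
  congr 1
  rw [← h1, List.map_map]
  apply List.map_congr_left
  intro ab hab
  obtain ⟨hab1, hab2, hab3⟩ := h2 ab hab
  simp only [Function.comp, pvFmt, pvG]
  by_cases he : (ab.1 : Int) = (ab.2 : Int) - 1
  · have hv : s.getD ab.1 0 = s.getD (ab.2 - 1) 0 := by
      rw [hab3]
      omega
    rw [if_pos he, if_pos hv]
  · have hv : ¬ (s.getD ab.1 0 = s.getD (ab.2 - 1) 0) := by
      rw [hab3]
      intro hcon
      apply he
      omega
    rw [if_neg he, if_neg hv]

-- ===== VERDICT (by name: the statement is the Claim_ definition above) =====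
theorem compress_hours_py_spec : Claim_equal_compress_hours_py := by
  intro hours _
  unfold Spec_compress_hours_py
  rw [pv_B_char]
  unfold compress_hours_py
  by_cases hnil : hours = []
  · subst hnil
    simp [PySem.List.sorted, PySem.Str.join]
  · rw [if_neg hnil]
    rcases hs : PySem.List.sorted hours (fun x => x) false with _ | ⟨s0, rest⟩
    · exact absurd ((PySem.List.sorted_eq_nil_iff hours (fun x => x) false).mp hs) hnil
    · have h0 : pvBStep [] s0 = [(s0, s0)] := by simp [pvBStep]
      simp only [List.foldl_cons, h0]
      have := pv_inv rest [] s0 s0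
      simp only [List.map_nil, List.nil_append] at this
      rw [this]
      simp [pvFmt]
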